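-- pv_equiv track=rewrite | github.com/MIMPython/MIMPython2023-Assignment | assignment_module02/module02_student04_TranNgocHieu/module02_assignment14_student04_TranNgocHieu.py | num_to_page
-- ===== SOURCE A (Python) =====
-- import math
--
-- def num_to_page(num):
--     """
--     Hàm ngược của page_to_num, sử dụng cách 2
--     """
--     if num <= 9:
--         return num
--     else:
--         pow = 0
--         num_copy = int(num) - 9
--         while (num_copy > 0):
--             pow += 1
--             num_copy -= (10**(pow + 1) - 10**pow) * (pow + 1)
--         # Sau bước này, pow + 1 là số chữ số của số trang.
--         # Đếm số trang còn lại cần thiết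
--         # trong khoảng 10^pow đến 10^(pow + 1) - 1.
--         num_copy += (10**(pow + 1) - 10**pow) * (pow + 1)
--         page = math.ceil(num_copy / (pow + 1)) + 10**pow - 1
--         return page
-- ===== SOURCE B (Python) =====
-- def num_to_page(num):
--     if num <= 9:
--         return num
--     n = int(num)
--
--     def digits_upto(p):
--         # total digits used to number pages 1..p
--         total = 0
--         t = 1
--         while t <= p:
--             total += p - t + 1
--             t *= 10
--         return total
--
--     # grow an upper bound, then binary-search the least page
--     # whose cumulative digit count reaches n
--     hi = 1
--     while digits_upto(hi) < n:
--         hi *= 2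
--     lo = 1
--     while lo < hi:
--         mid = (lo + hi) // 2
--         if digits_upto(mid) < n:
--             lo = mid + 1
--         else:
--             hi = mid
--     return lo
-- ===== Notes on version B (the rewrite author's own statement) =====
-- stated objective: alternative
-- what changed: Replaces A's subtract-digit-length-groups loop plus ceiling formula by a binary search for the least page whose cumulative digit count (computed by a digits-upto-p subroutine) reaches num.
import Mathlib
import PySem

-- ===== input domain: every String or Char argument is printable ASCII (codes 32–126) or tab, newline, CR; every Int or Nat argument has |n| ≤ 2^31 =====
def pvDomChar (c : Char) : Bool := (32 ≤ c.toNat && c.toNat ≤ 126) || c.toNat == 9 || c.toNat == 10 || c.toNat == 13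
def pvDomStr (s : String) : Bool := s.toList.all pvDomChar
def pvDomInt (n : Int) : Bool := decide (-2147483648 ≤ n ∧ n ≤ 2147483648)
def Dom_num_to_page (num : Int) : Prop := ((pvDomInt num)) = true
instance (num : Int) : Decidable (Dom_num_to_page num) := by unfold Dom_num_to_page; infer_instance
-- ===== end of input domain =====

-- B replaces A's subtract-digit-length-groups loop + ceiling formula by a binary search for
-- the least page whose cumulative digit count reaches num; objective: alternative algorithm.

-- ===== PORT A =====
-- the amount A subtracts in one loop iteration is ≥ 180 (cited by aLoop's decreasing_by)
theorem pv_amount_ge (p : Nat) : 180 ≤ ((10:Int)^(p+2) - 10^(p+1)) * ((p:Int)+2) := by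
  have h1 : (10:Int)^(p+1) ≥ 10 := by
    calc (10:Int)^(p+1) ≥ 10^1 := by
          exact pow_le_pow_right₀ (by norm_num) (by omega)
      _ = 10 := pow_one 10
  have h2 : ((10:Int)^(p+2) - 10^(p+1)) = 9 * 10^(p+1) := by ring
  have h3 : ((p:Int)+2) ≥ 2 := by omega
  calc (180:Int) = (9 * 10) * 2 := by norm_num
    _ ≤ (9 * 10^(p+1)) * ((p:Int)+2) := by
        apply mul_le_mul (by omega) h3 (by norm_num) (by positivity)
    _ = ((10:Int)^(p+2) - 10^(p+1)) * ((p:Int)+2) := by rw [h2]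

-- the while loop of A: state (num_copy, pow); pow is a Python int that stays ≥ 0, carried as Nat
def aLoop (nc : Int) (pow : Nat) : Int × Nat :=
  if h : nc > 0 then
    aLoop (nc - ((10:Int)^(pow+2) - 10^(pow+1)) * ((pow:Int)+2)) (pow+1)
  else (nc, pow)
termination_by nc.toNat
decreasing_by
  have := pv_amount_ge pow
  omega

def num_to_page (num : Int) : Int :=
  if num ≤ 9 then num
  else
    let r := aLoop (num - 9) 0
    let nc := r.1 + ((10:Int)^(r.2+1) - 10^r.2) * ((r.2:Int)+1)
    -- math.ceil(nc/(pow+1)): the float quotient is exact enough on |num| ≤ 2^31, so this is the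
    -- integer ceiling, ported exactly as -((-nc) // (pow+1))
    (-(PySem.Int.floordiv (-nc) ((r.2:Int)+1))) + 10^r.2 - 1

-- ===== PORT B =====
-- the while loop of digits_upto: state (t, total); fuel only makes it total in Lean
-- (p.toNat + 1 steps always suffice since t is 10^k after k steps and 10^(p+1) > p)
def dLoop (fuel : Nat) (p t total : Int) : Int :=
  match fuel with
  | 0 => total
  | f+1 => if t ≤ p then dLoop f p (t*10) (total + (p - t + 1)) else total

-- digits_upto(p): total digits used to number pages 1..p
def digitsUpto (p : Int) : Int := dLoop (p.toNat + 1) p 1 0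

-- the hi-doubling while loop; fuel num.toNat suffices (digitsUpto hi ≥ hi and 2^num ≥ num)
def hiLoop (fuel : Nat) (n hi : Int) : Int :=
  match fuel with
  | 0 => hi
  | f+1 => if digitsUpto hi < n then hiLoop f n (hi*2) else hi

-- the binary-search while loop; fuel hi.toNat suffices (hi - lo at least halves each step)
def bsearch (fuel : Nat) (n lo hi : Int) : Int :=
  match fuel with
  | 0 => lo
  | f+1 =>
    if lo < hi then
      let mid := PySem.Int.floordiv (lo + hi) 2
      if digitsUpto mid < n then bsearch f n (mid+1) hi else bsearch f n lo mid
    else lo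

def num_to_page_alt (num : Int) : Int :=
  if num ≤ 9 then num
  else
    let hi := hiLoop num.toNat num 1
    bsearch hi.toNat num 1 hi

-- ===== PRECONDITION & SPEC =====
def Spec_num_to_page (num : Int) (out : Int) : Prop := out = num_to_page_alt num
instance (num : Int) (out : Int) : Decidable (Spec_num_to_page num out) := by unfold Spec_num_to_page; infer_instance

-- ===== CLAIM (what is proved, stated in full; the proofs are below) =====
def Claim_equal_num_to_page : Prop := ∀ (num : Int), Dom_num_to_page num → Spec_num_to_page num (num_to_page num)

-- ===== LEMMAS AND PROOFS =====

-- digits consumed by all pages with fewer than P+1 digits … group sums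
def Ssum (P : Nat) : Int := ∑ j ∈ Finset.range P, 9 * 10^j * ((j:Int)+1)

def Tsum (P : Nat) : Int := ∑ j ∈ Finset.range (P+1), (10:Int)^j

def Gf (P : Nat) : Int := ((10:Int)^(P+1) - 10^P) * ((P:Int)+1)

theorem Ssum_succ (P : Nat) : Ssum (P+1) = Ssum P + Gf P := by
  unfold Ssum Gf
  rw [Finset.sum_range_succ]
  ring

theorem ST_id (P : Nat) : Ssum P + Tsum P = ((P:Int)+1) * 10^P := by
  induction P with
  | zero => simp [Ssum, Tsum]
  | succ P ih =>
      have h := Ssum_succ P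
      unfold Tsum at *
      rw [Finset.sum_range_succ (n := P+1)] at *
      unfold Gf at h
      push_cast at *
      nlinarith [ih, h]

theorem dLoop_sum (F : Nat) : ∀ (p t total : Int), 1 ≤ t →
    dLoop F p t total = total + ∑ j ∈ Finset.range F, max (p - t * 10^j + 1) 0 := by
  induction F with
  | zero => intro p t total _; simp [dLoop]
  | succ F ih =>
      intro p t total ht
      by_cases h : t ≤ p
      · rw [dLoop, if_pos h, ih p (t*10) (total + (p - t + 1)) (by omega)]
        rw [Finset.sum_range_succ']
        have e0 : max (p - t * 10^0 + 1) 0 = p - t + 1 := by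
          simp only [pow_zero, mul_one]; omega
        rw [e0]
        have : ∀ j, max (p - t * 10 * 10^j + 1) 0 = max (p - t * 10^(j+1) + 1) 0 := by
          intro j; ring_nf
        simp only [this]
        ring
      · rw [dLoop, if_neg h]
        have : ∀ j ∈ Finset.range (F+1), max (p - t * 10^j + 1) 0 = 0 := by
          intro j _
          have h10 : (1:Int) ≤ 10^j := one_le_pow₀ (by norm_num)
          have : t ≤ t * 10^j := le_mul_of_one_le_right (by omega) h10
          simp; omega
        rw [Finset.sum_congr rfl this]
        simp

theorem pow10_gt_self (m : Nat) : (m : Int) < 10^(m+1) := by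
  have h : m < 2^(m+1) := by
    calc m < 2^m := Nat.lt_two_pow_self
      _ ≤ 2^(m+1) := Nat.pow_le_pow_right (by norm_num) (by omega)
  calc (m : Int) < (2:Int)^(m+1) := by exact_mod_cast h
    _ ≤ 10^(m+1) := pow_le_pow_left₀ (by norm_num) (by norm_num) _

-- the sum is unchanged once 10^F exceeds p
theorem sum_stable (p : Int) (F1 F2 : Nat) (h : F1 ≤ F2) (hp : p < 10^F1) :
    ∑ j ∈ Finset.range F2, max (p - 10^j + 1) 0 = ∑ j ∈ Finset.range F1, max (p - 10^j + 1) 0 := by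
  rw [← Finset.sum_range_add_sum_Ico _ h]
  have : ∀ j ∈ Finset.Ico F1 F2, max (p - (10:Int)^j + 1) 0 = 0 := by
    intro j hj
    have hj1 : F1 ≤ j := (Finset.mem_Ico.mp hj).1
    have : (10:Int)^F1 ≤ 10^j := pow_le_pow_right₀ (by norm_num) hj1
    simp; omega
  rw [Finset.sum_congr rfl this]
  simp

theorem digitsUpto_eqF (p : Int) (F : Nat) (hp : 0 ≤ p) (hF : p.toNat + 1 ≤ F) :
    digitsUpto p = ∑ j ∈ Finset.range F, max (p - 10^j + 1) 0 := by
  unfold digitsUpto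
  rw [dLoop_sum _ p 1 0 (by norm_num)]
  simp only [one_mul, zero_add]
  have hp10 : p < 10^(p.toNat + 1) := by
    have := pow10_gt_self p.toNat
    omega
  rw [sum_stable p (p.toNat+1) F hF hp10]

theorem digitsUpto_mono (p q : Int) (hp : 0 ≤ p) (hpq : p ≤ q) :
    digitsUpto p ≤ digitsUpto q := by
  have hq : 0 ≤ q := le_trans hp hpq
  have hF : p.toNat + 1 ≤ q.toNat + 1 := by omega
  rw [digitsUpto_eqF p (q.toNat+1) hp hF, digitsUpto_eqF q (q.toNat+1) hq (le_refl _)]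
  apply Finset.sum_le_sum
  intro j _
  apply max_le_max _ (le_refl 0)
  omega

theorem digitsUpto_ge_self (p : Int) (hp : 0 ≤ p) : p ≤ digitsUpto p := by
  rw [digitsUpto_eqF p (p.toNat+1) hp (le_refl _)]
  have h0 : (0:Nat) ∈ Finset.range (p.toNat+1) := by simp
  calc p ≤ max (p - 10^(0:Nat) + 1) 0 := by simp only [pow_zero]; omega
    _ ≤ ∑ j ∈ Finset.range (p.toNat+1), max (p - 10^j + 1) 0 := by
        apply Finset.single_le_sum (f := fun j => max (p - (10:Int)^j + 1) 0) _ h0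
        intro i _; exact le_max_right _ _
  
-- closed form of digitsUpto on the digit-length group of P+1-digit pages (and its left edge)
theorem digitsUpto_closed (P : Nat) (q : Int) (h1 : 10^P - 1 ≤ q) (h2 : q < 10^(P+1)) :
    digitsUpto q = Ssum P + (q - 10^P + 1) * ((P:Int)+1) := by
  have hq0 : 0 ≤ q := by
    have : (1:Int) ≤ 10^P := one_le_pow₀ (by norm_num)
    omega
  have hF : q.toNat + 1 ≤ max (q.toNat + 1) (P+1) := le_max_left _ _
  rw [digitsUpto_eqF q _ hq0 hF]
  rw [sum_stable q (P+1) _ (le_max_right _ _) h2]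
  have hdrop : ∀ j ∈ Finset.range (P+1), max (q - (10:Int)^j + 1) 0 = q - 10^j + 1 := by
    intro j hj
    have hjP : j ≤ P := by simpa [Nat.lt_succ_iff] using hj
    have : (10:Int)^j ≤ 10^P := pow_le_pow_right₀ (by norm_num) hjP
    simp; omega
  rw [Finset.sum_congr rfl hdrop]
  have hsum : ∑ j ∈ Finset.range (P+1), (q - (10:Int)^j + 1)
      = ((P:Int)+1) * (q+1) - Tsum P := by
    unfold Tsum
    have hterm : ∀ j ∈ Finset.range (P+1), q - (10:Int)^j + 1 = (q+1) - 10^j := by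
      intro j _; ring
    rw [Finset.sum_congr rfl hterm, Finset.sum_sub_distrib, Finset.sum_const,
      Finset.card_range]
    ring
  rw [hsum]
  have := ST_id P
  linarith

-- A's loop characterisation: starting from a positive num_copy, the exit state r has r.1 ≤ 0,
-- restored remainder r.1 + Gf r.2 positive, and the restored remainder shifted by group sums equal
theorem aLoop_char : ∀ (k : Nat) (nc : Int) (p : Nat), nc.toNat ≤ k → 0 < nc →
    p + 1 ≤ (aLoop nc p).2 ∧
    0 < (aLoop nc p).1 + Gf (aLoop nc p).2 ∧
    (aLoop nc p).1 ≤ 0 ∧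
    (aLoop nc p).1 + Gf (aLoop nc p).2 + Ssum (aLoop nc p).2 = nc + Ssum (p+1) := by
  intro k
  induction k with
  | zero => intro nc p h1 h2; omega
  | succ k ih =>
      intro nc p h1 h2
      rw [aLoop, dif_pos h2]
      have hg : ((10:Int)^(p+2) - 10^(p+1)) * ((p:Int)+2) = Gf (p+1) := by
        unfold Gf; push_cast; ring
      rw [hg]
      set nc' := nc - Gf (p+1) with hnc'
      have hG := pv_amount_ge p
      rw [hg] at hG
      by_cases h : 0 < nc'
      · have := ih nc' (p+1) (by omega) h
        refine ⟨by omega, this.2.1, this.2.2.1, ?_⟩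
        rw [this.2.2.2]
        have := Ssum_succ (p+1)
        omega
      · rw [aLoop, dif_neg h]
        refine ⟨by omega, by simp; omega, by simp; omega, by simp; omega⟩

-- B's hi-doubling loop: result ≥ 1 and its digit count reaches n (fuel adequate when n ≤ hi·2^fuel)
theorem hiLoop_char : ∀ (fuel : Nat) (n hi : Int), 1 ≤ hi → n ≤ hi * 2^fuel →
    1 ≤ hiLoop fuel n hi ∧ n ≤ digitsUpto (hiLoop fuel n hi) := by
  intro fuel
  induction fuel with
  | zero =>
      intro n hi h1 h2
      simp only [pow_zero, mul_one] at h2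
      refine ⟨h1, ?_⟩
      simp only [hiLoop]
      exact le_trans h2 (digitsUpto_ge_self hi (by omega))
  | succ f ih =>
      intro n hi h1 h2
      rw [hiLoop]
      by_cases h : digitsUpto hi < n
      · rw [if_pos h]
        apply ih n (hi*2) (by omega)
        calc n ≤ hi * 2^(f+1) := h2
          _ = hi * 2 * 2^f := by ring
      · rw [if_neg h]
        exact ⟨h1, by omega⟩

-- B's binary search keeps the bracket digitsUpto(lo−1) < n ≤ digitsUpto(hi) and returns its limit
theorem bsearch_char : ∀ (fuel : Nat) (n lo hi : Int), (hi - lo).toNat ≤ fuel →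
    1 ≤ lo → lo ≤ hi → digitsUpto (lo-1) < n → n ≤ digitsUpto hi →
    1 ≤ bsearch fuel n lo hi ∧ digitsUpto (bsearch fuel n lo hi - 1) < n ∧
      n ≤ digitsUpto (bsearch fuel n lo hi) := by
  intro fuel
  induction fuel with
  | zero =>
      intro n lo hi hf h1 h2 h3 h4
      have : lo = hi := by omega
      subst this
      exact ⟨h1, by simpa using h3, h4⟩
  | succ f ih =>
      intro n lo hi hf h1 h2 h3 h4
      rw [bsearch]
      by_cases h : lo < hi
      · rw [if_pos h]
        have hmid := (PySem.Int.floordiv_eq_iff_of_pos (a := lo + hi) (by norm_num : (0:Int) < 2)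
          (q := PySem.Int.floordiv (lo + hi) 2)).mp rfl
        set mid := PySem.Int.floordiv (lo + hi) 2 with hmiddef
        have hlo : lo ≤ mid := by omega
        have hhi : mid < hi := by omega
        by_cases hd : digitsUpto mid < n
        · rw [if_pos hd]
          exact ih n (mid+1) hi (by omega) (by omega) (by omega) (by simpa using hd) h4
        · rw [if_neg hd]
          exact ih n lo mid (by omega) h1 hlo h3 (by omega)
      · rw [if_neg h]
        have : lo = hi := by omega
        subst this
        exact ⟨h1, h3, h4⟩

-- the bracket determines the page uniquely (monotonicity of digitsUpto)
theorem bracket_unique (n a b : Int) (ha1 : 1 ≤ a) (hb1 : 1 ≤ b)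
    (ha : digitsUpto (a-1) < n ∧ n ≤ digitsUpto a)
    (hb : digitsUpto (b-1) < n ∧ n ≤ digitsUpto b) : a = b := by
  rcases lt_trichotomy a b with h | h | h
  · have : digitsUpto a ≤ digitsUpto (b-1) := digitsUpto_mono a (b-1) (by omega) (by omega)
    omega
  · exact h
  · have : digitsUpto b ≤ digitsUpto (a-1) := digitsUpto_mono b (a-1) (by omega) (by omega)
    omega

-- A's page satisfies the bracket digitsUpto(page−1) < num ≤ digitsUpto(page)
theorem aPage_bracket (num : Int) (h : ¬ num ≤ 9) :
    1 ≤ num_to_page num ∧ digitsUpto (num_to_page num - 1) < num ∧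
      num ≤ digitsUpto (num_to_page num) := by
  have h9 : 0 < num - 9 := by omega
  obtain ⟨hP1, hpos, hle, heq⟩ := aLoop_char (num - 9).toNat (num - 9) 0 (le_refl _) h9
  set r := aLoop (num - 9) 0 with hr
  set P := r.2 with hPdef
  have hunf : num_to_page num
      = (-(PySem.Int.floordiv (-(r.1 + Gf P)) ((P:Int)+1))) + 10^P - 1 := by
    unfold num_to_page
    rw [if_neg h]
    rfl
  rw [hunf]
  set ncr := r.1 + Gf P with hncr
  -- Ssum 1 = 9, so ncr = num - Ssum P
  have hS1 : Ssum 1 = 9 := by unfold Ssum; simp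
  have hncr_eq : ncr = num - Ssum P := by
    have := heq; rw [hS1] at this; omega
  -- ceiling via floordiv
  have hd : (0:Int) < (P:Int) + 1 := by positivity
  have hq := (PySem.Int.floordiv_eq_iff_of_pos (a := -ncr) hd
    (q := PySem.Int.floordiv (-ncr) ((P:Int)+1))).mp rfl
  set c := -(PySem.Int.floordiv (-ncr) ((P:Int)+1)) with hc
  have hceil1 : (c-1) * ((P:Int)+1) < ncr := by nlinarith [hq.2]
  have hceil2 : ncr ≤ c * ((P:Int)+1) := by nlinarith [hq.1]
  have hc1 : 1 ≤ c := by nlinarith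
  have hGfP : Gf P = 9 * 10^P * ((P:Int)+1) := by unfold Gf; ring
  have hc2 : c ≤ 9 * 10^P := by nlinarith [hle, hGfP, hncr]
  set pg := c + (10:Int)^P - 1 with hpg
  have hp10 : (1:Int) ≤ 10^P := one_le_pow₀ (by norm_num)
  have hpgrange1 : 10^P - 1 ≤ pg - 1 := by omega
  have hpgrange2 : pg < 10^(P+1) := by
    have : (10:Int)^(P+1) = 10 * 10^P := by ring
    omega
  have hDpg : digitsUpto pg = Ssum P + c * ((P:Int)+1) := by
    rw [digitsUpto_closed P pg (by omega) hpgrange2]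
    congr 1
    have : pg - 10^P + 1 = c := by omega
    rw [this]
  have hDpg1 : digitsUpto (pg - 1) = Ssum P + (c-1) * ((P:Int)+1) := by
    rw [digitsUpto_closed P (pg-1) hpgrange1 (by omega)]
    congr 1
    have : pg - 1 - 10^P + 1 = c - 1 := by omega
    rw [this]
  refine ⟨by omega, ?_, ?_⟩
  · rw [hDpg1]; omega
  · rw [hDpg]; omega

-- B returns the bracketed page
theorem bPage_bracket (num : Int) (h : ¬ num ≤ 9) :
    1 ≤ num_to_page_alt num ∧ digitsUpto (num_to_page_alt num - 1) < num ∧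
      num ≤ digitsUpto (num_to_page_alt num) := by
  have hunf : num_to_page_alt num
      = bsearch (hiLoop num.toNat num 1).toNat num 1 (hiLoop num.toNat num 1) := by
    unfold num_to_page_alt
    rw [if_neg h]
  rw [hunf]
  have hnum : (10:Int) ≤ num := by omega
  have hfuel : num ≤ 1 * 2^num.toNat := by
    have h2 : num.toNat < 2^num.toNat := Nat.lt_two_pow_self
    have : (num.toNat : Int) < (2:Int)^num.toNat := by exact_mod_cast h2
    omega
  obtain ⟨hhi1, hhid⟩ := hiLoop_char num.toNat num 1 (by norm_num) hfuel
  set hi := hiLoop num.toNat num 1 with hhidef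
  have hD0 : digitsUpto 0 = 0 := by decide
  apply bsearch_char hi.toNat num 1 hi (by omega) (by norm_num) hhi1 _ hhid
  have : digitsUpto (1-1) = 0 := by norm_num [hD0]
  omega

-- ===== VERDICT (by name: the statement is the Claim_ definition above) =====
theorem num_to_page_spec : Claim_equal_num_to_page := by
  intro num _
  unfold Spec_num_to_page
  by_cases h : num ≤ 9
  · unfold num_to_page num_to_page_alt
    simp [h]
  · obtain ⟨ha1, ha2, ha3⟩ := aPage_bracket num h
    obtain ⟨hb1, hb2, hb3⟩ := bPage_bracket num h
    exact bracket_unique num _ _ ha1 hb1 ⟨ha2, ha3⟩ ⟨hb2, hb3⟩
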